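-- pv_equiv track=rewrite | github.com/jacup101/COMP_379_Memory_Allocation | memory_allocation.py | find_all_holes
-- ===== SOURCE A (Python) =====
-- def find_all_holes(mem):
--     holes = []
--     start = 0
--     end = 0
--     inHole = False
--     for i in range(len(mem)):
--         if mem[i] == 0:
--             if inHole:
--                 end = i
--             else:
--                 start = i
--                 end = i
--                 inHole = True
--         else:
--             if inHole:
--                 holes.append([start, end, end - start + 1])
--                 inHole = False
--     if inHole:
--         holes.append([start, len(mem) - 1, len(mem) - start])
--     return holes
-- ===== SOURCE B (Python) =====
-- def find_all_holes(mem):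
--     holes = []
--     n = len(mem)
--     i = 0
--     while i < n:
--         if mem[i] == 0:
--             j = i
--             while j < n and mem[j] == 0:
--                 j += 1
--             holes.append([i, j - 1, j - i])
--             i = j
--         else:
--             i += 1
--     return holes
-- ===== Notes on version B (the rewrite author's own statement) =====
-- stated objective: alternative
-- what changed: Replaces the inHole boolean state machine (with start/end registers and a trailing flush) by a two-pointer run scanner: on hitting a zero an inner loop consumes the whole run and emits its record immediately, so no state or final flush is needed.
import Mathlib
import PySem

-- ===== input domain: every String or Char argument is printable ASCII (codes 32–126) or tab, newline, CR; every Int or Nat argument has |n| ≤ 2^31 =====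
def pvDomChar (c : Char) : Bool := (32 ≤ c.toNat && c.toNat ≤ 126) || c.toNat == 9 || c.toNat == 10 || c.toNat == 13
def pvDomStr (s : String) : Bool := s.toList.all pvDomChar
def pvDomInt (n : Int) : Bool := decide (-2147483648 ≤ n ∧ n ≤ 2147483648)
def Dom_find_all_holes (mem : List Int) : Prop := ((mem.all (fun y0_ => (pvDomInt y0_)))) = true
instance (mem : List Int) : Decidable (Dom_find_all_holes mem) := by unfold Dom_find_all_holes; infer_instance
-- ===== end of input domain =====

-- B replaces A's inHole state machine by a two-pointer run scanner (same O(n) cost, different decomposition).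


-- ===== PORT A =====
-- A's 'for i in range(len(mem))' loop over state (holes, start, end, inHole); n = len(mem)
def find_all_holes_go (l : List Int) (i : Int) (holes : List (List Int))
    (start fin : Int) (inHole : Bool) (n : Int) : List (List Int) :=
  match l with
  | [] => if inHole then holes ++ [[start, n - 1, n - start]] else holes
  | x :: xs =>
    if x = 0 then
      if inHole then find_all_holes_go xs (i + 1) holes start i true n
      else find_all_holes_go xs (i + 1) holes i i true n
    else
      if inHole then
        find_all_holes_go xs (i + 1) (holes ++ [[start, fin, fin - start + 1]]) start fin false n
      else find_all_holes_go xs (i + 1) holes start fin false n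

def find_all_holes (mem : List Int) : List (List Int) :=
  find_all_holes_go mem 0 [] 0 0 false (mem.length : Int)

-- ===== PORT B =====
-- B's outer while: on a zero, the inner while consumes the run (takeWhile/dropWhile) and emits its record.
def find_all_holes_alt_go (l : List Int) (i : Int) : List (List Int) :=
  match l with
  | [] => []
  | x :: xs =>
    if x = 0 then
      let k : Int := ((x :: xs).takeWhile (fun y => y == 0)).length
      [i, i + k - 1, k] :: find_all_holes_alt_go ((x :: xs).dropWhile (fun y => y == 0)) (i + k)
    else find_all_holes_alt_go xs (i + 1)
termination_by l.length
decreasing_by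
  simp only [List.dropWhile]
  split
  · exact Nat.lt_succ_of_le (List.length_dropWhile_le _ _)
  · simp_all
  · simp

def find_all_holes_alt (mem : List Int) : List (List Int) :=
  find_all_holes_alt_go mem 0

-- ===== PRECONDITION & SPEC =====
def Spec_find_all_holes (mem : List Int) (out : List (List Int)) : Prop := out = find_all_holes_alt mem
instance (mem : List Int) (out : List (List Int)) : Decidable (Spec_find_all_holes mem out) := by unfold Spec_find_all_holes; infer_instance

-- ===== CLAIM (what is proved, stated in full; the proofs are below) =====
def Claim_equal_find_all_holes : Prop := ∀ (mem : List Int), Dom_find_all_holes mem → Spec_find_all_holes mem (find_all_holes mem)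

-- ===== LEMMAS AND PROOFS =====

lemma find_all_holes_key : ∀ (l : List Int) (i : Int) (holes : List (List Int)) (s e : Int),
    (find_all_holes_go l i holes s e false (i + l.length) = holes ++ find_all_holes_alt_go l i) ∧
    (find_all_holes_go l i holes s (i - 1) true (i + l.length) =
      holes ++ [s, i + ((l.takeWhile (fun y => y == 0)).length : Int) - 1,
                 i + ((l.takeWhile (fun y => y == 0)).length : Int) - s] ::
        find_all_holes_alt_go (l.dropWhile (fun y => y == 0))
          (i + ((l.takeWhile (fun y => y == 0)).length : Int))) := by
  intro l
  induction l with
  | nil =>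
    intro i holes s e
    refine ⟨by simp [find_all_holes_go, find_all_holes_alt_go], ?_⟩
    simp [find_all_holes_go, find_all_holes_alt_go]
  | cons x xs ih =>
    intro i holes s e
    by_cases hx : x = 0
    · subst hx
      have hlen : i + (((0 : Int) :: xs).length : Int) = (i + 1) + (xs.length : Int) := by
        simp; ring
      have htk : List.takeWhile (fun y => y == 0) ((0 : Int) :: xs)
          = 0 :: List.takeWhile (fun y => y == 0) xs := by simp [List.takeWhile]
      have hdr : List.dropWhile (fun y => y == 0) ((0 : Int) :: xs)
          = List.dropWhile (fun y => y == 0) xs := by simp [List.dropWhile]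
      have harith : i + (((0 : Int) :: List.takeWhile (fun y => y == 0) xs).length : Int)
          = (i + 1) + ((List.takeWhile (fun y => y == 0) xs).length : Int) := by
        simp; ring
      constructor
      · rw [find_all_holes_go]
        simp only [reduceIte]
        rw [hlen]
        have h := (ih (i + 1) holes i e).2
        rw [show (i : Int) + 1 - 1 = i from by ring] at h
        rw [h]
        conv_rhs => rw [find_all_holes_alt_go]
        simp only [reduceIte, htk, hdr, harith, Bool.false_eq_true, if_false]
        rw [show (((0 : Int) :: List.takeWhile (fun y => y == 0) xs).length : Int)
              = i + 1 + ((List.takeWhile (fun y => y == 0) xs).length : Int) - i from by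
            simp; ring]
      · rw [find_all_holes_go]
        simp only [reduceIte]
        rw [hlen]
        have h := (ih (i + 1) holes s e).2
        rw [show (i : Int) + 1 - 1 = i from by ring] at h
        rw [h, htk, hdr, harith]
    · have hxb : (x == 0) = false := by simpa using hx
      have hlen : i + (((x : Int) :: xs).length : Int) = (i + 1) + (xs.length : Int) := by
        simp; ring
      have htk : List.takeWhile (fun y => y == 0) (x :: xs) = [] := by
        simp [List.takeWhile, hxb]
      have hdr : List.dropWhile (fun y => y == 0) (x :: xs) = x :: xs := by
        simp [List.dropWhile, hxb]
      constructor
      · rw [find_all_holes_go]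
        simp only [if_neg hx, Bool.false_eq_true, if_false]
        rw [hlen, (ih (i + 1) holes s e).1]
        conv_rhs => rw [find_all_holes_alt_go]
        simp only [if_neg hx]
      · rw [find_all_holes_go]
        simp only [if_neg hx, reduceIte]
        rw [hlen, (ih (i + 1) (holes ++ [[s, i - 1, i - 1 - s + 1]]) s (i - 1)).1,
          htk, hdr, show i - 1 - s + 1 = i - s from by ring]
        conv_rhs => rw [find_all_holes_alt_go]
        simp only [if_neg hx, List.length_nil, Nat.cast_zero, add_zero, List.append_assoc,
          List.singleton_append]

-- ===== VERDICT (by name: the statement is the Claim_ definition above) =====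
theorem find_all_holes_spec : Claim_equal_find_all_holes := by
  intro mem _
  unfold Spec_find_all_holes find_all_holes find_all_holes_alt
  have h := (find_all_holes_key mem 0 [] 0 0).1
  simpa using h
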